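-- pv_equiv track=rewrite | github.com/szolen/ip-blocklist | src/main.py | build_chunks
-- ===== SOURCE A (Python) =====
-- MAX_CHUNK_BYTES = 32 * 1024
--
-- def build_chunks(entries: list[str], max_chunk_bytes: int = MAX_CHUNK_BYTES) -> list[str]:
--     chunks: list[str] = []
--     current_lines: list[str] = []
--     current_size = 0
--
--     for entry in entries:
--         clean_entry = entry.strip()
--         if not clean_entry:
--             continue
--
--         line = f"{clean_entry}\n"
--         line_size = len(line.encode("utf-8"))
--
--         if line_size > max_chunk_bytes:
--             raise ValueError(
--                 f"Single entry exceeds chunk size limit ({max_chunk_bytes} bytes): {clean_entry}"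
--             )
--
--         if current_lines and current_size + line_size > max_chunk_bytes:
--             chunks.append("".join(current_lines))
--             current_lines = []
--             current_size = 0
--
--         current_lines.append(line)
--         current_size += line_size
--
--     if current_lines:
--         chunks.append("".join(current_lines))
--
--     return chunks
-- ===== SOURCE B (Python) =====
-- MAX_CHUNK_BYTES = 32 * 1024
--
-- def build_chunks(entries: list[str], max_chunk_bytes: int = MAX_CHUNK_BYTES) -> list[str]:
--     # Pass 1: normalize and validate.
--     lines: list[tuple[str, int]] = []
--     for entry in entries:
--         clean = entry.strip()
--         if not clean:
--             continue
--         line = clean + "\n"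
--         size = len(line.encode("utf-8"))
--         if size > max_chunk_bytes:
--             raise ValueError(
--                 f"Single entry exceeds chunk size limit ({max_chunk_bytes} bytes): {clean}"
--             )
--         lines.append((line, size))
--
--     # Pass 2: greedy maximal-prefix packing (validation guarantees each size <= limit).
--     chunks: list[str] = []
--     i = 0
--     n = len(lines)
--     while i < n:
--         j = i + 1
--         total = lines[i][1]
--         while j < n and total + lines[j][1] <= max_chunk_bytes:
--             total += lines[j][1]
--             j += 1
--         chunks.append("".join(line for line, _ in lines[i:j]))
--         i = j
--     return chunks
-- ===== Notes on version B (the rewrite author's own statement) =====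
-- stated objective: alternative
-- what changed: A's single fused loop (strip/validate/pack with running chunk state) is split into two passes: pass 1 normalizes and validates lines, pass 2 packs them by repeatedly grabbing the maximal prefix of lines that fits, joining each prefix into a chunk.
import Mathlib
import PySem

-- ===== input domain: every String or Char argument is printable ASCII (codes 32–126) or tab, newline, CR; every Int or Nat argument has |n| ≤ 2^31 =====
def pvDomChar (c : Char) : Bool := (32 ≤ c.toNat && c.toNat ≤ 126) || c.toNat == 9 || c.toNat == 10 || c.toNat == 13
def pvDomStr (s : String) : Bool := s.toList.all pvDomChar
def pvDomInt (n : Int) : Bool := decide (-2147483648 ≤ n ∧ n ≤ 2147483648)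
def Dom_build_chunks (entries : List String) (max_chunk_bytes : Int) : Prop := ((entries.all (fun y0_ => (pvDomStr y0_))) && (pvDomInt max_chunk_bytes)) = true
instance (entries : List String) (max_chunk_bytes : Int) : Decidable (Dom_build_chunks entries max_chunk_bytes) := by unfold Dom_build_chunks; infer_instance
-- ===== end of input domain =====

-- B replaces A's single fused loop by two passes (validate/normalize, then maximal-prefix packing);
-- equal return values are proved on Pre_ (the inputs where A does not raise ValueError).

-- ===== PORT A =====
-- A's single loop over entries carrying (chunks, current_lines, current_size).
-- len(line.encode("utf-8")) is ported as PySem.Str.len line: exact on the ASCII domain Dom_ (every char is one UTF-8 byte).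
-- The `raise ValueError` branch is excluded by Pre_build_chunks; there this port returns the chunks built so far.
def buildLoopA (max_chunk_bytes : Int) : List String → List String → List String → Int → List String
  | [], chunks, current_lines, _ =>
      if current_lines ≠ [] then chunks ++ [PySem.Str.join "" current_lines] else chunks
  | entry :: rest, chunks, current_lines, current_size =>
      let clean_entry := PySem.Str.strip entry
      if clean_entry = "" then
        buildLoopA max_chunk_bytes rest chunks current_lines current_size
      else
        let line := clean_entry ++ "\n"
        let line_size := PySem.Str.len line
        if line_size > max_chunk_bytes then
          chunks  -- raise ValueError (outside Pre_build_chunks)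
        else if current_lines ≠ [] ∧ current_size + line_size > max_chunk_bytes then
          buildLoopA max_chunk_bytes rest (chunks ++ [PySem.Str.join "" current_lines]) [line] line_size
        else
          buildLoopA max_chunk_bytes rest chunks (current_lines ++ [line]) (current_size + line_size)

def build_chunks (entries : List String) (max_chunk_bytes : Int) : List String :=
  buildLoopA max_chunk_bytes entries [] [] 0

-- ===== PORT B =====
-- Pass 1 of Source B: normalize and validate; `none` is the ValueError raise (outside Pre_build_chunks).
def collectB (max_chunk_bytes : Int) : List String → Option (List (String × Int))
  | [] => some []
  | entry :: rest =>
      let clean := PySem.Str.strip entry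
      if clean = "" then collectB max_chunk_bytes rest
      else
        let line := clean ++ "\n"
        let size := PySem.Str.len line
        if size > max_chunk_bytes then none
        else (collectB max_chunk_bytes rest).map (fun ls => (line, size) :: ls)

-- Source B's inner while: extend the current chunk while the next line still fits.
def grabB (max_chunk_bytes : Int) : Int → List (String × Int) → List String × List (String × Int)
  | _, [] => ([], [])
  | total, (line, size) :: rest =>
      if total + size ≤ max_chunk_bytes then
        let r := grabB max_chunk_bytes (total + size) rest
        (line :: r.1, r.2)
      else ([], (line, size) :: rest)

-- (termination helper for packB, cited by its decreasing_by)
theorem grabB_snd_length_le (max_chunk_bytes total : Int) (xs : List (String × Int)) :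
    (grabB max_chunk_bytes total xs).2.length ≤ xs.length := by
  induction xs generalizing total with
  | nil => simp [grabB]
  | cons h t ih =>
      obtain ⟨line, size⟩ := h
      simp only [grabB]
      split
      · exact (ih _).trans (Nat.le_succ _)
      · simp

-- Source B's outer while: each chunk is the current line plus the maximal run of following lines that fit.
def packB (max_chunk_bytes : Int) : List (String × Int) → List String
  | [] => []
  | (line, size) :: rest =>
      let r := grabB max_chunk_bytes size rest
      PySem.Str.join "" (line :: r.1) :: packB max_chunk_bytes r.2
termination_by xs => xs.length
decreasing_by
  simp only [List.length_cons]
  exact Nat.lt_succ_of_le (grabB_snd_length_le _ _ _)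

def build_chunks_alt (entries : List String) (max_chunk_bytes : Int) : List String :=
  match collectB max_chunk_bytes entries with
  | none => []  -- ValueError raised in pass 1 (outside Pre_build_chunks)
  | some lines => packB max_chunk_bytes lines

-- ===== PRECONDITION & SPEC =====
-- Pre_ excludes exactly the inputs where A raises ValueError: some entry whose stripped,
-- newline-terminated line exceeds max_chunk_bytes bytes.  (B raises there too.)
def Pre_build_chunks (entries : List String) (max_chunk_bytes : Int) : Prop :=
  ∀ e ∈ entries, PySem.Str.strip e ≠ "" →
    PySem.Str.len (PySem.Str.strip e ++ "\n") ≤ max_chunk_bytes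

instance (entries : List String) (max_chunk_bytes : Int) : Decidable (Pre_build_chunks entries max_chunk_bytes) := by
  unfold Pre_build_chunks; infer_instance

def pvWitness_build_chunks : List String × Int := (["a", " b ", ""], 10)

def Spec_build_chunks (entries : List String) (max_chunk_bytes : Int) (out : List String) : Prop := out = build_chunks_alt entries max_chunk_bytes
instance (entries : List String) (max_chunk_bytes : Int) (out : List String) : Decidable (Spec_build_chunks entries max_chunk_bytes out) := by unfold Spec_build_chunks; infer_instance

-- ===== CLAIM (what is proved, stated in full; the proofs are below) =====
def Claim_equal_build_chunks : Prop := ∀ (entries : List String) (max_chunk_bytes : Int), Dom_build_chunks entries max_chunk_bytes → Pre_build_chunks entries max_chunk_bytes → Spec_build_chunks entries max_chunk_bytes (build_chunks entries max_chunk_bytes)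

-- ===== LEMMAS AND PROOFS =====

-- Intermediate: A's loop, replayed over the already-normalized (line, size) list.
def loopL (max_chunk_bytes : Int) : List (String × Int) → List String → List String → Int → List String
  | [], chunks, cur, _ =>
      if cur ≠ [] then chunks ++ [PySem.Str.join "" cur] else chunks
  | (line, n) :: rest, chunks, cur, size =>
      if cur ≠ [] ∧ size + n > max_chunk_bytes then
        loopL max_chunk_bytes rest (chunks ++ [PySem.Str.join "" cur]) [line] n
      else
        loopL max_chunk_bytes rest chunks (cur ++ [line]) (size + n)

theorem buildLoopA_eq_loopL (max : Int) (entries : List String) :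
    ∀ (lines : List (String × Int)), collectB max entries = some lines →
    ∀ chunks cur size, buildLoopA max entries chunks cur size = loopL max lines chunks cur size := by
  induction entries with
  | nil =>
      intro lines h chunks cur size
      simp only [collectB, Option.some.injEq] at h
      subst h
      rfl
  | cons e rest ih =>
      intro lines h chunks cur size
      simp only [collectB] at h
      by_cases hs : PySem.Str.strip e = ""
      · simp only [hs] at h
        simp only [buildLoopA, hs]
        exact ih lines h chunks cur size
      · simp only [if_neg hs] at h
        by_cases hb : PySem.Str.len (PySem.Str.strip e ++ "\n") > max
        · rw [if_pos hb] at h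
          simp at h
        · simp only [if_neg hb, Option.map_eq_some_iff] at h
          obtain ⟨ls', hrest, hlines⟩ := h
          subst hlines
          simp only [buildLoopA, if_neg hs, if_neg hb, loopL]
          split
          · exact ih ls' hrest _ _ _
          · exact ih ls' hrest _ _ _

theorem loopL_nonempty (max : Int) (lines : List (String × Int)) :
    ∀ chunks cur size, cur ≠ [] →
    loopL max lines chunks cur size =
      chunks ++ (PySem.Str.join "" (cur ++ (grabB max size lines).1)
                  :: packB max (grabB max size lines).2) := by
  induction lines with
  | nil =>
      intro chunks cur size hcur
      simp [loopL, grabB, packB, hcur]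
  | cons h t ih =>
      obtain ⟨line, n⟩ := h
      intro chunks cur size hcur
      by_cases hfit : size + n ≤ max
      · have hnot : ¬ (cur ≠ [] ∧ size + n > max) := by
          rintro ⟨-, hgt⟩; omega
        simp only [loopL, if_neg hnot, grabB, if_pos hfit]
        rw [ih chunks (cur ++ [line]) (size + n) (by simp)]
        simp
      · have hyes : cur ≠ [] ∧ size + n > max := ⟨hcur, by omega⟩
        simp only [loopL, if_pos hyes, grabB, if_neg hfit]
        rw [ih (chunks ++ [PySem.Str.join "" cur]) [line] n (by simp)]
        simp only [packB]
        simp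

theorem loopL_empty (max : Int) (lines : List (String × Int)) (chunks : List String) :
    loopL max lines chunks [] 0 = chunks ++ packB max lines := by
  cases lines with
  | nil => simp [loopL, packB]
  | cons h t =>
      obtain ⟨line, n⟩ := h
      have hnot : ¬ (([] : List String) ≠ [] ∧ (0 : Int) + n > max) := by
        rintro ⟨hne, -⟩; exact hne rfl
      simp only [loopL, if_neg hnot, List.nil_append]
      rw [loopL_nonempty max t chunks [line] (0 + n) (by simp)]
      simp only [packB, zero_add]
      simp

theorem collectB_isSome (max : Int) (entries : List String)
    (h : Pre_build_chunks entries max) : ∃ ls, collectB max entries = some ls := by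
  induction entries with
  | nil => exact ⟨[], rfl⟩
  | cons e rest ih =>
      have hrest : Pre_build_chunks rest max := fun x hx => h x (List.mem_cons_of_mem _ hx)
      obtain ⟨ls', hls'⟩ := ih hrest
      by_cases hs : PySem.Str.strip e = ""
      · exact ⟨ls', by simp [collectB, hs, hls']⟩
      · have hle := h e (List.mem_cons_self) hs
        refine ⟨(PySem.Str.strip e ++ "\n", PySem.Str.len (PySem.Str.strip e ++ "\n")) :: ls', ?_⟩
        simp only [collectB, if_neg hs]
        rw [if_neg (by omega), hls']
        rfl

-- ===== VERDICT (by name: the statement is the Claim_ definition above) =====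
theorem build_chunks_spec : Claim_equal_build_chunks := by
  intro entries max _ hpre
  unfold Spec_build_chunks build_chunks build_chunks_alt
  obtain ⟨ls, hls⟩ := collectB_isSome max entries hpre
  rw [buildLoopA_eq_loopL max entries ls hls, hls]
  simpa using loopL_empty max ls []
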